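-- pv_equiv track=rewrite | github.com/PrithwishJana/CoTran | transpilers/TSS_CodeConv_PyTranslations/477/GFG.py | findQuadruples
-- ===== SOURCE A (Python) =====
-- def findQuadruples(a, b, c, d, x, n):
--     count = 0
--     for i in range(0, n):
--         for j in range(0, n):
--             for k in range(0, n):
--                 for l in range(0, n):
--                     if (a [i] ^ b [j] ^ c [k] ^ d [l]) == x:
--                         count += 1
--     return count
-- ===== SOURCE B (Python) =====
-- def findQuadruples(a, b, c, d, x, n):
--     # O(n^2): tally every a-value XOR b-value once, then sum, over all
--     # (c-value, d-value) pairs, the tally of the needed complement.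
--     m = n if n > 0 else 0
--     aa, bb, cc, dd = a[:m], b[:m], c[:m], d[:m]
--     cnt = {}
--     for u in aa:
--         for v in bb:
--             cnt[u ^ v] = cnt.get(u ^ v, 0) + 1
--     return sum(cnt.get(x ^ z ^ w, 0) for w in cc for z in dd)
-- ===== Notes on version B (the rewrite author's own statement) =====
-- stated objective: faster
-- what changed: Replaces the quadruple nested index scan by a value-based two-phase pass: slice out the first n elements, build a dict of counts of u^v over a-b value pairs, then sum the dict count of the complement x^z^w over c-d value pairs; intended as faster (O(n^2) vs O(n^4); measured 12x at the largest size where both finished).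
import Mathlib
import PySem

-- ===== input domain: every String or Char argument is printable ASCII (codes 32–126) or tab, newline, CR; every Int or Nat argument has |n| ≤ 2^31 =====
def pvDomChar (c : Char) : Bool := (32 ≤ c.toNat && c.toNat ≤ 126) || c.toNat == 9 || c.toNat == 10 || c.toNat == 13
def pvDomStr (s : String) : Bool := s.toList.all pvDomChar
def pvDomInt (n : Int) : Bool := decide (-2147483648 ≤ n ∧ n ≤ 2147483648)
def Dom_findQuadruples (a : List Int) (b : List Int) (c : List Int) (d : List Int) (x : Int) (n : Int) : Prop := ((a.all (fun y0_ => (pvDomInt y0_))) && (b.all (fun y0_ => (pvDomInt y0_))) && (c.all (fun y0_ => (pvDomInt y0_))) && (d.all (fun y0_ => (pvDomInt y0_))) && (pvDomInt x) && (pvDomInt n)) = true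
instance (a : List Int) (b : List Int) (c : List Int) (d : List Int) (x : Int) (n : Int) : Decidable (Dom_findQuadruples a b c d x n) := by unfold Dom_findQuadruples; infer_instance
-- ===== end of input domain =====

-- B replaces A's quadruple index scan by a value-based two-phase pass: slice out the
-- first n elements, tally u^v over a-b value pairs in a dict, then sum the tally of
-- the complement x^z^w over c-d value pairs (intended as faster; measured 12x at the
-- largest size where both finished).

-- ===== PORT A =====
def findQuadruples (a : List Int) (b : List Int) (c : List Int) (d : List Int) (x : Int) (n : Int) : Int :=
  (PySem.List.pyRange 0 n 1).foldl (fun count i =>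
    (PySem.List.pyRange 0 n 1).foldl (fun count j =>
      (PySem.List.pyRange 0 n 1).foldl (fun count k =>
        (PySem.List.pyRange 0 n 1).foldl (fun count l =>
          if PySem.Int.bxor (PySem.Int.bxor (PySem.Int.bxor (PySem.List.pyGetD a i 0) (PySem.List.pyGetD b j 0)) (PySem.List.pyGetD c k 0)) (PySem.List.pyGetD d l 0) = x
          then count + 1 else count) count) count) count) 0

-- ===== PORT B =====
def findQuadruples_alt (a : List Int) (b : List Int) (c : List Int) (d : List Int) (x : Int) (n : Int) : Int :=
  let m : Int := if n > 0 then n else 0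
  let aa := PySem.List.slice a none (some m)
  let bb := PySem.List.slice b none (some m)
  let cc := PySem.List.slice c none (some m)
  let dd := PySem.List.slice d none (some m)
  let cnt : PySem.Dict Int Int :=
    aa.foldl (fun cnt u =>
      bb.foldl (fun cnt v =>
        cnt.insert (PySem.Int.bxor u v) (cnt.getD (PySem.Int.bxor u v) 0 + 1)) cnt) PySem.Dict.empty
  (cc.flatMap (fun w => dd.map (fun z =>
    cnt.getD (PySem.Int.bxor (PySem.Int.bxor x z) w) 0))).sum

-- ===== PRECONDITION & SPEC =====
-- Pre_: exactly the inputs on which the Python A returns (an IndexError is raised iff n > 0 and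
-- n exceeds the length of one of the four lists).
def Pre_findQuadruples (a : List Int) (b : List Int) (c : List Int) (d : List Int) (x : Int) (n : Int) : Prop :=
  n ≤ 0 ∨ (n ≤ (a.length : Int) ∧ n ≤ (b.length : Int) ∧ n ≤ (c.length : Int) ∧ n ≤ (d.length : Int))
instance (a : List Int) (b : List Int) (c : List Int) (d : List Int) (x : Int) (n : Int) : Decidable (Pre_findQuadruples a b c d x n) := by unfold Pre_findQuadruples; infer_instance
def pvWitness_findQuadruples : List Int × List Int × List Int × List Int × Int × Int := ([1, 2], [0, 3], [1, 1], [2, 0], 3, 2)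

def Spec_findQuadruples (a : List Int) (b : List Int) (c : List Int) (d : List Int) (x : Int) (n : Int) (out : Int) : Prop := out = findQuadruples_alt a b c d x n
instance (a : List Int) (b : List Int) (c : List Int) (d : List Int) (x : Int) (n : Int) (out : Int) : Decidable (Spec_findQuadruples a b c d x n out) := by unfold Spec_findQuadruples; infer_instance

-- ===== CLAIM (what is proved, stated in full; the proofs are below) =====
def Claim_equal_findQuadruples : Prop := ∀ (a : List Int) (b : List Int) (c : List Int) (d : List Int) (x : Int) (n : Int), Dom_findQuadruples a b c d x n → Pre_findQuadruples a b c d x n → Spec_findQuadruples a b c d x n (findQuadruples a b c d x n)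

-- ===== LEMMAS AND PROOFS =====

-- PySem.Int.bxor on Int constructors (Python's infinite two's complement).
theorem pv_bxor_ofNat_ofNat (m k : Nat) :
    PySem.Int.bxor (Int.ofNat m) (Int.ofNat k) = Int.ofNat (m ^^^ k) := by
  simp [PySem.Int.bxor, Int.ofNat_eq_natCast]

theorem pv_bxor_ofNat_negSucc (m k : Nat) :
    PySem.Int.bxor (Int.ofNat m) (Int.negSucc k) = Int.negSucc (m ^^^ k) := by
  have h1 : ¬ (0 ≤ (Int.negSucc k)) := by omega
  simp only [PySem.Int.bxor, Int.ofNat_eq_natCast, Int.natCast_nonneg, if_pos, if_neg h1]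
  have h2 : (-(Int.negSucc k) - 1).toNat = k := by omega
  rw [h2, Int.toNat_natCast]
  omega

theorem pv_bxor_negSucc_ofNat (m k : Nat) :
    PySem.Int.bxor (Int.negSucc m) (Int.ofNat k) = Int.negSucc (m ^^^ k) := by
  have h1 : ¬ (0 ≤ (Int.negSucc m)) := by omega
  simp only [PySem.Int.bxor, Int.ofNat_eq_natCast, Int.natCast_nonneg, if_pos, if_neg h1]
  have h2 : (-(Int.negSucc m) - 1).toNat = m := by omega
  rw [h2, Int.toNat_natCast]
  omega

theorem pv_bxor_negSucc_negSucc (m k : Nat) :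
    PySem.Int.bxor (Int.negSucc m) (Int.negSucc k) = Int.ofNat (m ^^^ k) := by
  have h1 : ¬ (0 ≤ (Int.negSucc m)) := by omega
  have h2 : ¬ (0 ≤ (Int.negSucc k)) := by omega
  simp only [PySem.Int.bxor, if_neg h1, if_neg h2]
  have h3 : (-(Int.negSucc m) - 1).toNat = m := by omega
  have h4 : (-(Int.negSucc k) - 1).toNat = k := by omega
  rw [h3, h4]
  rfl

theorem pv_bxor_cancel (a b : Int) : PySem.Int.bxor (PySem.Int.bxor a b) b = a := by
  cases a with
  | ofNat m =>
    cases b with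
    | ofNat k => rw [pv_bxor_ofNat_ofNat, pv_bxor_ofNat_ofNat, Nat.xor_xor_cancel_right]
    | negSucc k => rw [pv_bxor_ofNat_negSucc, pv_bxor_negSucc_negSucc, Nat.xor_xor_cancel_right]
  | negSucc m =>
    cases b with
    | ofNat k => rw [pv_bxor_negSucc_ofNat, pv_bxor_negSucc_ofNat, Nat.xor_xor_cancel_right]
    | negSucc k => rw [pv_bxor_negSucc_negSucc, pv_bxor_ofNat_negSucc, Nat.xor_xor_cancel_right]

theorem pv_bxor_eq_iff (t b x : Int) : PySem.Int.bxor t b = x ↔ t = PySem.Int.bxor x b := by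
  constructor
  · intro h; rw [← h, pv_bxor_cancel]
  · intro h; rw [h, pv_bxor_cancel]

-- Σ over a list of a Σ over a second list commutes.
theorem pv_sum_sum_comm {α β : Type} (L : List α) (M : List β) (F : α → β → Int) :
    (L.map (fun p => (M.map (fun q => F p q)).sum)).sum
      = (M.map (fun q => (L.map (fun p => F p q)).sum)).sum := by
  induction L with
  | nil => simp
  | cons p L ih =>
    simp only [List.map_cons, List.sum_cons, ih, ← List.sum_map_add]

-- A nested Σ over two lists is the Σ over the flattened value list.
theorem pv_sum_flatMap {α β γ : Type} (L : List α) (M : List β) (e : α → β → γ) (F : γ → Int) :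
    (L.map (fun i => ((M.map (fun j => F (e i j))).sum))).sum
      = ((L.flatMap (fun i => M.map (e i))).map F).sum := by
  induction L with
  | nil => simp
  | cons i L ih => simp [ih, List.map_map, Function.comp_def]

-- the generic counting identity behind A = B
theorem pv_key_identity (P : List Int) (Q : List (Int × Int)) (x : Int) :
    (P.map (fun u => (Q.countP (fun q => decide (PySem.Int.bxor (PySem.Int.bxor u q.1) q.2 = x)) : Int))).sum
      = (Q.map (fun q => (P.count (PySem.Int.bxor (PySem.Int.bxor x q.2) q.1) : Int))).sum := by
  have hcond : ∀ (u : Int) (q : Int × Int),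
      (PySem.Int.bxor (PySem.Int.bxor u q.1) q.2 = x) ↔ (u = PySem.Int.bxor (PySem.Int.bxor x q.2) q.1) := by
    intro u q
    rw [pv_bxor_eq_iff, pv_bxor_eq_iff]
  calc (P.map (fun u => (Q.countP (fun q => decide (PySem.Int.bxor (PySem.Int.bxor u q.1) q.2 = x)) : Int))).sum
      = (P.map (fun u => (Q.map (fun q => if (decide (u = PySem.Int.bxor (PySem.Int.bxor x q.2) q.1)) = true then (1 : Int) else 0)).sum)).sum := by
        apply congrArg
        apply List.map_congr_left
        intro u _
        rw [PySem.List.sum_map_ite_one_zero]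
        congr 1
        apply List.countP_congr
        intro q _
        simp [hcond u q]
    _ = (Q.map (fun q => (P.map (fun u => if (decide (u = PySem.Int.bxor (PySem.Int.bxor x q.2) q.1)) = true then (1 : Int) else 0)).sum)).sum := by
        exact pv_sum_sum_comm P Q _
    _ = (Q.map (fun q => (P.count (PySem.Int.bxor (PySem.Int.bxor x q.2) q.1) : Int))).sum := by
        apply congrArg
        apply List.map_congr_left
        intro q _
        rw [PySem.List.sum_map_ite_one_zero, List.count_eq_countP]
        norm_num
        apply List.countP_congr
        intro u _
        simp

-- the quadruple nested sum over four value lists equals the double sum of complement-counts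
set_option maxHeartbeats 2000000 in
theorem pv_main4 (L1 L2 L3 L4 : List Int) (x : Int) :
    (L1.map (fun u => (L2.map (fun v => (L3.map (fun w => ((L4.countP (fun z => decide (PySem.Int.bxor (PySem.Int.bxor (PySem.Int.bxor u v) w) z = x))) : Int))).sum)).sum)).sum
      = (L3.map (fun w => (L4.map (fun z => ((L1.flatMap (fun u => L2.map (fun v => PySem.Int.bxor u v))).count (PySem.Int.bxor (PySem.Int.bxor x z) w) : Int))).sum)).sum := by
  have hQ : ∀ t : Int,
      (L3.map (fun w => ((L4.countP (fun z => decide (PySem.Int.bxor (PySem.Int.bxor t w) z = x))) : Int))).sum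
        = ((L3.flatMap (fun w => L4.map (fun z => (w, z)))).countP (fun q => decide (PySem.Int.bxor (PySem.Int.bxor t q.1) q.2 = x)) : Int) := by
    intro t
    rw [← PySem.List.sum_map_ite_one_zero]
    rw [← pv_sum_flatMap L3 L4 (fun w z => (w, z)) (fun q => if (decide (PySem.Int.bxor (PySem.Int.bxor t q.1) q.2 = x)) = true then (1 : Int) else 0)]
    apply congrArg
    apply List.map_congr_left
    intro w _
    rw [PySem.List.sum_map_ite_one_zero]
  calc (L1.map (fun u => (L2.map (fun v => (L3.map (fun w => ((L4.countP (fun z => decide (PySem.Int.bxor (PySem.Int.bxor (PySem.Int.bxor u v) w) z = x))) : Int))).sum)).sum)).sum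
      = (L1.map (fun u => (L2.map (fun v => ((L3.flatMap (fun w => L4.map (fun z => (w, z)))).countP (fun q => decide (PySem.Int.bxor (PySem.Int.bxor (PySem.Int.bxor u v) q.1) q.2 = x)) : Int))).sum)).sum := by
        apply congrArg; apply List.map_congr_left; intro u _
        apply congrArg; apply List.map_congr_left; intro v _
        exact hQ (PySem.Int.bxor u v)
    _ = ((L1.flatMap (fun u => L2.map (fun v => PySem.Int.bxor u v))).map (fun t => ((L3.flatMap (fun w => L4.map (fun z => (w, z)))).countP (fun q => decide (PySem.Int.bxor (PySem.Int.bxor t q.1) q.2 = x)) : Int))).sum := by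
        exact pv_sum_flatMap L1 L2 (fun u v => PySem.Int.bxor u v) (fun t => ((L3.flatMap (fun w => L4.map (fun z => (w, z)))).countP (fun q => decide (PySem.Int.bxor (PySem.Int.bxor t q.1) q.2 = x)) : Int))
    _ = ((L3.flatMap (fun w => L4.map (fun z => (w, z)))).map (fun q => ((L1.flatMap (fun u => L2.map (fun v => PySem.Int.bxor u v))).count (PySem.Int.bxor (PySem.Int.bxor x q.2) q.1) : Int))).sum := by
        exact pv_key_identity _ _ x
    _ = (L3.map (fun w => (L4.map (fun z => ((L1.flatMap (fun u => L2.map (fun v => PySem.Int.bxor u v))).count (PySem.Int.bxor (PySem.Int.bxor x z) w) : Int))).sum)).sum := by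
        exact (pv_sum_flatMap L3 L4 (fun w z => (w, z)) (fun q => ((L1.flatMap (fun u => L2.map (fun v => PySem.Int.bxor u v))).count (PySem.Int.bxor (PySem.Int.bxor x q.2) q.1) : Int))).symm

-- the index range 0..m maps to the first m values of the list
theorem pv_map_take (a : List Int) (m : Int) (h0 : 0 ≤ m) (h : m ≤ (a.length : Int)) :
    (PySem.List.pyRange 0 m 1).map (fun i => PySem.List.pyGetD a i 0) = a.take m.toNat := by
  have hlen : ((a.take m.toNat).length : Int) = m := by simp; omega
  have hz := PySem.List.map_pyGetD_pyRange_zero' (a.take m.toNat) (0 : Int)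
  rw [hlen] at hz
  rw [← hz]
  apply List.map_congr_left
  intro i hi
  rw [PySem.List.mem_pyRange_one] at hi
  rw [PySem.List.pyGetD_eq_getElem a 0 hi.1 (by omega),
      PySem.List.pyGetD_eq_getElem (a.take m.toNat) 0 hi.1 (by simp; omega)]
  simp [List.getElem_take]

-- pointwise-equal bodies give equal folds
theorem pv_foldl_congr {α β : Type} (l : List α) (f g : β → α → β) (i : β)
    (h : ∀ x y, f x y = g x y) : l.foldl f i = l.foldl g i := by
  have hfg : f = g := funext fun x => funext (h x)
  rw [hfg]

-- fold over an index range with pyGetD = fold over the value prefix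
theorem pv_foldl_vals {β : Type} (a : List Int) (m : Int) (h0 : 0 ≤ m) (h : m ≤ (a.length : Int))
    (g : β → Int → β) (init : β) :
    (PySem.List.pyRange 0 m 1).foldl (fun acc i => g acc (PySem.List.pyGetD a i 0)) init
      = (a.take m.toNat).foldl g init := by
  rw [← pv_map_take a m h0 h, List.foldl_map]

-- quadruple foldl over value lists = B's dict-count double sum over the same value lists
set_option maxHeartbeats 2000000 in
theorem pv_eq_lists (A' B' C' D' : List Int) (x : Int) :
    A'.foldl (fun count u =>
      B'.foldl (fun count v =>
        C'.foldl (fun count w =>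
          D'.foldl (fun count z =>
            if PySem.Int.bxor (PySem.Int.bxor (PySem.Int.bxor u v) w) z = x then count + 1 else count) count) count) count) 0
      = (C'.flatMap (fun w => D'.map (fun z =>
          ((A'.foldl (fun cnt u => B'.foldl (fun (cnt : PySem.Dict Int Int) v =>
              cnt.insert (PySem.Int.bxor u v) (cnt.getD (PySem.Int.bxor u v) 0 + 1)) cnt) PySem.Dict.empty).getD (PySem.Int.bxor (PySem.Int.bxor x z) w) 0)))).sum := by
  have hcntP : (A'.foldl (fun cnt u => B'.foldl (fun (cnt : PySem.Dict Int Int) v =>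
        cnt.insert (PySem.Int.bxor u v) (cnt.getD (PySem.Int.bxor u v) 0 + 1)) cnt) PySem.Dict.empty)
      = ((A'.flatMap (fun u => B'.map (fun v => PySem.Int.bxor u v))).foldl
          (fun (cnt : PySem.Dict Int Int) key => cnt.insert key (cnt.getD key 0 + 1)) PySem.Dict.empty) := by
    rw [List.foldl_flatMap]
    simp only [List.foldl_map]
  have hgetD : ∀ v : Int,
      (((A'.flatMap (fun u => B'.map (fun v => PySem.Int.bxor u v))).foldl
          (fun (cnt : PySem.Dict Int Int) key => cnt.insert key (cnt.getD key 0 + 1)) PySem.Dict.empty).getD v 0)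
        = ((A'.flatMap (fun u => B'.map (fun v => PySem.Int.bxor u v))).count v : Int) := by
    intro v
    rw [PySem.Dict.getD_foldl_insert_add_one, PySem.Dict.getD_empty, zero_add]
  simp only [hcntP, hgetD, PySem.List.foldl_ite_add_one, PySem.List.foldl_add, zero_add]
  rw [pv_main4]
  rw [pv_sum_flatMap C' D' (fun w z => ((A'.flatMap (fun u => B'.map (fun v => PySem.Int.bxor u v))).count (PySem.Int.bxor (PySem.Int.bxor x z) w) : Int)) (fun t => t)]
  simp

-- ===== VERDICT (by name: the statement is the Claim_ definition above) =====
set_option maxHeartbeats 2000000 in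
theorem findQuadruples_spec : Claim_equal_findQuadruples := by
  intro a b c d x n _ hpre
  unfold Spec_findQuadruples findQuadruples findQuadruples_alt
  dsimp only
  set m : Int := if n > 0 then n else 0 with hmdef
  have hm0 : 0 ≤ m := by rw [hmdef]; split <;> omega
  have hma : m ≤ (a.length : Int) := by rw [hmdef]; rcases hpre with h | h <;> split <;> omega
  have hmb : m ≤ (b.length : Int) := by rw [hmdef]; rcases hpre with h | h <;> split <;> omega
  have hmc : m ≤ (c.length : Int) := by rw [hmdef]; rcases hpre with h | h <;> split <;> omega
  have hmd : m ≤ (d.length : Int) := by rw [hmdef]; rcases hpre with h | h <;> split <;> omega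
  have hr : PySem.List.pyRange 0 n 1 = PySem.List.pyRange 0 m 1 := by
    rw [hmdef]; split
    · rfl
    · rw [PySem.List.pyRange_one_eq_nil (by omega), PySem.List.pyRange_one_eq_nil (by omega)]
  rw [hr]
  rw [PySem.List.slice_to a hm0, PySem.List.slice_to b hm0,
      PySem.List.slice_to c hm0, PySem.List.slice_to d hm0]
  rw [pv_foldl_vals a m hm0 hma (fun count u =>
    (PySem.List.pyRange 0 m 1).foldl (fun count j =>
      (PySem.List.pyRange 0 m 1).foldl (fun count k =>
        (PySem.List.pyRange 0 m 1).foldl (fun count l =>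
          if PySem.Int.bxor (PySem.Int.bxor (PySem.Int.bxor u (PySem.List.pyGetD b j 0)) (PySem.List.pyGetD c k 0)) (PySem.List.pyGetD d l 0) = x
          then count + 1 else count) count) count) count) 0]
  have h2 : ∀ (count : Int) (u : Int),
      (PySem.List.pyRange 0 m 1).foldl (fun count j =>
        (PySem.List.pyRange 0 m 1).foldl (fun count k =>
          (PySem.List.pyRange 0 m 1).foldl (fun count l =>
            if PySem.Int.bxor (PySem.Int.bxor (PySem.Int.bxor u (PySem.List.pyGetD b j 0)) (PySem.List.pyGetD c k 0)) (PySem.List.pyGetD d l 0) = x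
            then count + 1 else count) count) count) count
      = (b.take m.toNat).foldl (fun count v =>
          (c.take m.toNat).foldl (fun count w =>
            (d.take m.toNat).foldl (fun count z =>
              if PySem.Int.bxor (PySem.Int.bxor (PySem.Int.bxor u v) w) z = x
              then count + 1 else count) count) count) count := by
    intro count u
    rw [pv_foldl_vals b m hm0 hmb (fun count v =>
      (PySem.List.pyRange 0 m 1).foldl (fun count k =>
        (PySem.List.pyRange 0 m 1).foldl (fun count l =>
          if PySem.Int.bxor (PySem.Int.bxor (PySem.Int.bxor u v) (PySem.List.pyGetD c k 0)) (PySem.List.pyGetD d l 0) = x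
          then count + 1 else count) count) count) count]
    apply pv_foldl_congr
    intro count' v
    rw [pv_foldl_vals c m hm0 hmc (fun count w =>
      (PySem.List.pyRange 0 m 1).foldl (fun count l =>
        if PySem.Int.bxor (PySem.Int.bxor (PySem.Int.bxor u v) w) (PySem.List.pyGetD d l 0) = x
        then count + 1 else count) count) count']
    apply pv_foldl_congr
    intro count'' w
    rw [pv_foldl_vals d m hm0 hmd (fun count z =>
      if PySem.Int.bxor (PySem.Int.bxor (PySem.Int.bxor u v) w) z = x
      then count + 1 else count) count'']
  simp only [h2]
  exact pv_eq_lists (a.take m.toNat) (b.take m.toNat) (c.take m.toNat) (d.take m.toNat) x
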